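-- pv_equiv track=rewrite | github.com/dlask913/Algorithm | 프로그래머스/unrated/138476. 귤 고르기/귤 고르기.py | solution
-- ===== SOURCE A (Python) =====
-- def solution(k, tangerine):
--     answer = 0
--     dic = {}
--     for x in tangerine:
--         if x not in dic:
--             dic[x]=1
--         else:
--             dic[x]+=1
--     arr = sorted(dic.values(), key=lambda x: -x)
--
--     for v in arr:
--         if k<=0:
--             break
--         k -= v
--         answer += 1
--
--     return answer
-- ===== SOURCE B (Python) =====
-- def solution(k, tangerine):
--     # counting-sort style: bucket the frequency values, walk magnitudes downward
--     freq = {}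
--     for x in tangerine:
--         freq[x] = freq.get(x, 0) + 1
--     counts = list(freq.values())
--     if not counts:
--         return 0
--     m = max(counts)
--     bucket = {}
--     for c in counts:
--         bucket[c] = bucket.get(c, 0) + 1
--     answer = 0
--     for c in range(m, 0, -1):
--         g = bucket.get(c, 0)
--         while g > 0 and k > 0:
--             k -= c
--             answer += 1
--             g -= 1
--     return answer
-- ===== Notes on version B (the rewrite author's own statement) =====
-- stated objective: alternative
-- what changed: Replaces the descending sort of the frequency values by a counting-sort traversal: a bucket table (count -> number of sizes with that count) is walked from the maximum count down to 1, consuming groups until k is exhausted.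
import Mathlib
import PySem

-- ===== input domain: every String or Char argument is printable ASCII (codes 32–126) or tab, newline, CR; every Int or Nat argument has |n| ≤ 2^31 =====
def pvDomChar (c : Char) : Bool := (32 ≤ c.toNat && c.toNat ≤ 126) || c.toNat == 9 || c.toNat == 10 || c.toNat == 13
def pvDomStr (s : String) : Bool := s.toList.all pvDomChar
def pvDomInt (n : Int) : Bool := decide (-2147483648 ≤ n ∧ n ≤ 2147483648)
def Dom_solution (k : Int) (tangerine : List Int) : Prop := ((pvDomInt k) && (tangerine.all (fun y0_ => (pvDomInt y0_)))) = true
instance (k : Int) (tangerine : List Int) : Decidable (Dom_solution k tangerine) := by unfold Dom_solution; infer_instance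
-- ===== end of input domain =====

-- B replaces A's descending sort of the frequency values by a counting-sort walk over a
-- count->multiplicity bucket table, from the maximum count down to 1 (alternative algorithm).

-- ===== PORT A =====
-- the greedy loop with its break: 'for v in arr: if k<=0: break; k-=v; answer+=1'
def loopA (k ans : Int) : List Int → Int
  | [] => ans
  | v :: rest => if k ≤ 0 then ans else loopA (k - v) (ans + 1) rest

def solution (k : Int) (tangerine : List Int) : Int :=
  -- dic: 'if x not in dic: dic[x]=1 else: dic[x]+=1'
  let dic := tangerine.foldl
    (fun d x => if d.contains x = false then d.insert x 1 else d.insert x (d.getD x 0 + 1))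
    (PySem.Dict.empty : PySem.Dict Int Int)
  let arr := PySem.List.sorted dic.values (fun x => -x) false
  loopA k 0 arr

-- ===== PORT B =====
-- 'while g > 0 and k > 0: k -= c; answer += 1; g -= 1'  (g = bucket.get(c,0) is ≥ 0, so
-- recursing on its Nat value is exact)
def altConsume (c : Int) (g : Nat) (k ans : Int) : Int × Int :=
  match g with
  | 0 => (k, ans)
  | g' + 1 => if 0 < k then altConsume c g' (k - c) (ans + 1) else (k, ans)

def solution_alt (k : Int) (tangerine : List Int) : Int :=
  let freq := tangerine.foldl (fun d x => d.insert x (d.getD x 0 + 1)) (PySem.Dict.empty : PySem.Dict Int Int)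
  let counts := freq.values
  match PySem.List.max? counts (fun x => x) with
  | none => 0          -- 'if not counts: return 0'
  | some m =>
    let bucket := counts.foldl (fun d c => d.insert c (d.getD c 0 + 1)) (PySem.Dict.empty : PySem.Dict Int Int)
    ((PySem.List.pyRange m 0 (-1)).foldl
        (fun p c => altConsume c ((bucket.getD c 0).toNat) p.1 p.2) (k, 0)).2

-- ===== PRECONDITION & SPEC =====
def Spec_solution (k : Int) (tangerine : List Int) (out : Int) : Prop := out = solution_alt k tangerine
instance (k : Int) (tangerine : List Int) (out : Int) : Decidable (Spec_solution k tangerine out) := by unfold Spec_solution; infer_instance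

-- ===== CLAIM (what is proved, stated in full; the proofs are below) =====
def Claim_equal_solution : Prop := ∀ (k : Int) (tangerine : List Int), Dom_solution k tangerine → Spec_solution k tangerine (solution k tangerine)

-- ===== LEMMAS AND PROOFS =====

-- pair-valued version of A's loop
def loopP (k ans : Int) : List Int → Int × Int
  | [] => (k, ans)
  | v :: rest => if k ≤ 0 then (k, ans) else loopP (k - v) (ans + 1) rest

theorem loopA_eq_loopP (l : List Int) : ∀ k ans, loopA k ans l = (loopP k ans l).2 := by
  induction l with
  | nil => intro k ans; rfl
  | cons v rest ih =>
    intro k ans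
    simp only [loopA, loopP]
    split_ifs with h
    · rfl
    · exact ih _ _

theorem loopP_of_nonpos (l : List Int) (k ans : Int) (h : k ≤ 0) : loopP k ans l = (k, ans) := by
  cases l with
  | nil => rfl
  | cons v rest => simp [loopP, h]

theorem loopP_append (xs ys : List Int) : ∀ k ans,
    loopP k ans (xs ++ ys) = loopP (loopP k ans xs).1 (loopP k ans xs).2 ys := by
  induction xs with
  | nil => intro k ans; rfl
  | cons v rest ih =>
    intro k ans
    simp only [List.cons_append, loopP]
    split_ifs with h
    · exact (loopP_of_nonpos ys k ans h).symm
    · exact ih _ _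

theorem loopP_replicate (c : Int) : ∀ (g : Nat) (k ans : Int),
    loopP k ans (List.replicate g c) = altConsume c g k ans := by
  intro g
  induction g with
  | zero => intro k ans; rfl
  | succ g' ih =>
    intro k ans
    simp only [List.replicate, loopP, altConsume]
    split_ifs with h1 h2
    · omega
    · rfl
    · exact ih _ _
    · omega

theorem loopP_flatMap (f : Int → Nat) (cs : List Int) : ∀ k ans,
    loopP k ans (cs.flatMap (fun c => List.replicate (f c) c)) =
      cs.foldl (fun p c => altConsume c (f c) p.1 p.2) (k, ans) := by
  induction cs with
  | nil => intro k ans; rfl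
  | cons c cs ih =>
    intro k ans
    simp only [List.flatMap_cons, List.foldl_cons]
    rw [loopP_append, loopP_replicate]
    exact ih _ _

-- the two dict-building folds agree
theorem dict_build_eq (tangerine : List Int) : ∀ (d : PySem.Dict Int Int),
    tangerine.foldl
      (fun (d : PySem.Dict Int Int) x =>
        if d.contains x = false then d.insert x 1 else d.insert x (d.getD x 0 + 1)) d =
    tangerine.foldl (fun d x => d.insert x (d.getD x 0 + 1)) d := by
  induction tangerine with
  | nil => intro d; rfl
  | cons x rest ih =>
    intro d
    simp only [List.foldl_cons]
    have hstep : (if d.contains x = false then d.insert x 1 else d.insert x (d.getD x 0 + 1)) =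
        d.insert x (d.getD x 0 + 1) := by
      split_ifs with h
      · rw [PySem.Dict.getD_of_not_contains (h := h)]; norm_num
      · rfl
    rw [hstep]; exact ih _

-- count of v in the flatMap of replicates over a nodup list
theorem count_flatMap_replicate (f : Int → Nat) (cs : List Int) (hnd : cs.Nodup) (v : Int) :
    (cs.flatMap (fun c => List.replicate (f c) c)).count v = if v ∈ cs then f v else 0 := by
  induction cs with
  | nil => simp
  | cons c cs ih =>
    simp only [List.flatMap_cons, List.count_append]
    have hnd' := List.nodup_cons.mp hnd
    rw [ih hnd'.2]
    by_cases hv : v = c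
    · subst hv
      simp [hnd'.1]
    · simp [List.count_replicate, Ne.symm hv, hv]

-- the flatMap of replicates over a strictly decreasing list is ≥-sorted
theorem pairwise_ge_flatMap_replicate (f : Int → Nat) (cs : List Int)
    (h : cs.Pairwise (fun a b => b < a)) :
    (cs.flatMap (fun c => List.replicate (f c) c)).Pairwise (fun a b => b ≤ a) := by
  induction cs with
  | nil => simp
  | cons c cs ih =>
    have h' := List.pairwise_cons.mp h
    simp only [List.flatMap_cons]
    refine List.pairwise_append.mpr ⟨?_, ih h'.2, ?_⟩
    · exact List.pairwise_replicate.mpr (Or.inr (le_refl c))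
    · intro a ha b hb
      have hac : a = c := (List.eq_of_mem_replicate ha)
      rcases List.mem_flatMap.mp hb with ⟨c', hc', hbc⟩
      have hbc' : b = c' := List.eq_of_mem_replicate hbc
      subst hac; subst hbc'
      exact le_of_lt (h'.1 _ hc')

-- pyRange m 0 (-1) is strictly decreasing
theorem pyRange_down_pairwise (m : Int) : (PySem.List.pyRange m 0 (-1)).Pairwise (fun a b => b < a) := by
  rw [PySem.List.pyRange_neg_one_eq_reverse]
  rw [List.pairwise_reverse]
  exact (PySem.List.pairwise_lt_pyRange_one 1 (m + 1))

-- the sorted frequency list equals the bucket walk's list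
theorem sorted_eq_descList (vs : List Int) (m : Int)
    (hm : PySem.List.max? vs (fun x => x) = some m)
    (hpos : ∀ v ∈ vs, 0 < v) :
    PySem.List.sorted vs (fun x => -x) false =
      (PySem.List.pyRange m 0 (-1)).flatMap (fun c => List.replicate (vs.count c) c) := by
  set cs := PySem.List.pyRange m 0 (-1) with hcs
  have hnd : cs.Nodup := by
    rw [hcs, PySem.List.pyRange_neg_one_eq_reverse]
    exact List.nodup_reverse.mpr (PySem.List.nodup_pyRange_one 1 (m + 1))
  have hmemcs : ∀ v : Int, v ∈ cs ↔ (0 < v ∧ v ≤ m) := by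
    intro v; rw [hcs]; exact PySem.List.mem_pyRange_neg_one
  have hperm : (cs.flatMap (fun c => List.replicate (vs.count c) c)).Perm vs := by
    rw [List.perm_iff_count]
    intro v
    rw [count_flatMap_replicate _ cs hnd v]
    by_cases hv : v ∈ cs
    · simp [hv]
    · simp only [hv, if_false]
      symm
      rw [List.count_eq_zero]
      intro hmem
      exact hv ((hmemcs v).mpr ⟨hpos v hmem, PySem.List.max?_isMax hm v hmem⟩)
  have hperm' : (cs.flatMap (fun c => List.replicate (vs.count c) c)).Perm
      (PySem.List.sorted vs (fun x => -x) false) :=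
    hperm.trans (PySem.List.sorted_perm vs (fun x => -x) false).symm
  have hs1 : (cs.flatMap (fun c => List.replicate (vs.count c) c)).Pairwise (fun a b => b ≤ a) :=
    pairwise_ge_flatMap_replicate _ cs (by rw [hcs]; exact pyRange_down_pairwise m)
  have hs2 : (PySem.List.sorted vs (fun x => -x) false).Pairwise (fun a b : Int => b ≤ a) := by
    have := PySem.List.sorted_pairwise vs (fun x => -x)
    exact this.imp (by intro a b h; omega)
  exact (List.Perm.eq_of_pairwise (fun a b _ _ h1 h2 => le_antisymm h2 h1) hs1 hs2 hperm').symm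

-- positivity of the counter's values
theorem counter_values_pos (t : List Int) :
    ∀ v ∈ (t.foldl (fun d x => d.insert x (d.getD x 0 + 1)) (PySem.Dict.empty : PySem.Dict Int Int)).values, 0 < v := by
  intro v hv
  rw [PySem.Dict.foldl_insert_getD_add_one_eq_counter] at hv
  have : (PySem.Dict.counter t).values =
      ((PySem.Set.ofList t).map (fun k => (k, (t.count k : Int)))).map (·.2) := by
    show (PySem.Dict.counter t).items.map (·.2) = _
    rw [PySem.Dict.items_counter]
  rw [this] at hv
  simp only [List.map_map, List.mem_map] at hv
  rcases hv with ⟨x, hx, hval⟩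
  have hxmem : x ∈ t := (PySem.List.mem_dedup _ _).mp (by simpa using hx)
  have : 0 < t.count x := List.count_pos_iff.mpr hxmem
  simp only [Function.comp] at hval
  omega

-- the bucket dict looks up the count
theorem bucket_getD (vs : List Int) (c : Int) :
    (vs.foldl (fun d c => d.insert c (d.getD c 0 + 1)) (PySem.Dict.empty : PySem.Dict Int Int)).getD c 0 = (vs.count c : Int) := by
  rw [PySem.Dict.foldl_insert_getD_add_one_eq_counter, PySem.Dict.getD_counter]

-- ===== VERDICT (by name: the statement is the Claim_ definition above) =====
theorem solution_spec : Claim_equal_solution := by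
  intro k tangerine _
  simp only [Spec_solution, solution, solution_alt]
  rw [dict_build_eq]
  cases hm : PySem.List.max?
      (tangerine.foldl (fun d x => d.insert x (d.getD x 0 + 1))
        (PySem.Dict.empty : PySem.Dict Int Int)).values (fun x => x) with
  | none =>
    have hnil := (PySem.List.max?_eq_none_iff _ _).mp hm
    simp only [hnil]
    rfl
  | some m =>
    simp only
    have hpos := counter_values_pos tangerine
    rw [sorted_eq_descList _ m hm hpos]
    rw [loopA_eq_loopP, loopP_flatMap]
    congr 2
    funext p c
    rw [bucket_getD]
    simp
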